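-- pv_equiv track=rewrite | github.com/Ayander/Password-Manager | Password_Manager.py | check_security_level
-- ===== SOURCE A (Python) =====
-- import string
--
-- def check_security_level(password):
--     has_alpha = any(c.isalpha() for c in password)
--     has_digit = any(c.isdigit() for c in password)
--     has_special = any(c in string.punctuation for c in password)
--
--     if has_alpha and has_digit and has_special:
--         return 2
--     elif has_alpha and has_digit:
--         return 1
--     else:
--         return 0
-- ===== SOURCE B (Python) =====
-- import string
--
-- def check_security_level(password):
--     has_alpha = has_digit = has_special = False
--     for c in password:
--         if c.isalpha():
--             has_alpha = True
--         if c.isdigit():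
--             has_digit = True
--         if c in string.punctuation:
--             has_special = True
--         if has_alpha and has_digit and has_special:
--             break
--     if has_alpha and has_digit and has_special:
--         return 2
--     if has_alpha and has_digit:
--         return 1
--     return 0
-- ===== Notes on version B (the rewrite author's own statement) =====
-- stated objective: alternative
-- what changed: replaces three independent full any()-scans of the string with a single pass maintaining three flags and an early break once all three are set
import Mathlib
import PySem

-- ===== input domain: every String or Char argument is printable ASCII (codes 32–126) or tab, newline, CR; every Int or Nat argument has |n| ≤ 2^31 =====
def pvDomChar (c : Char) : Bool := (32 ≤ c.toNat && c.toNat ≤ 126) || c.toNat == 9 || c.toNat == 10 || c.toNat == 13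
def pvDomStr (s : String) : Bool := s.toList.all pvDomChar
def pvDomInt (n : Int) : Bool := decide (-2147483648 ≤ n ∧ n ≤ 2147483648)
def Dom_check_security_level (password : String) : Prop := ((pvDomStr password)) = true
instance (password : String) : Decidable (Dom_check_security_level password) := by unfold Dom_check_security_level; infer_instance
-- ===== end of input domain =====

-- B replaces A's three independent any()-scans with a single pass over the string
-- maintaining three flags and breaking early once all are set (alternative decomposition).


-- ===== PORT A =====
-- string.punctuation; 'c in string.punctuation' for a single char c is exactly list membership
def pvPunct : List Char := "!\"#$%&'()*+,-./:;<=>?@[\\]^_`{|}~".toList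

def check_security_level (password : String) : Int :=
  let has_alpha := password.toList.any (fun c => PySem.Chars.isalpha c)
  let has_digit := password.toList.any (fun c => PySem.Chars.isdigit c)
  let has_special := password.toList.any (fun c => pvPunct.contains c)
  if has_alpha && has_digit && has_special then 2
  else if has_alpha && has_digit then 1
  else 0

-- ===== PORT B =====
-- single pass: carry the three flags, break as soon as all are true
def pvAltLoop : List Char → Bool → Bool → Bool → Bool × Bool × Bool
  | [], a, d, s => (a, d, s)
  | c :: cs, a, d, s =>
    let a' := if PySem.Chars.isalpha c then true else a
    let d' := if PySem.Chars.isdigit c then true else d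
    let s' := if pvPunct.contains c then true else s
    if a' && d' && s' then (a', d', s') else pvAltLoop cs a' d' s'

def check_security_level_alt (password : String) : Int :=
  let r := pvAltLoop password.toList false false false
  if r.1 && r.2.1 && r.2.2 then 2
  else if r.1 && r.2.1 then 1
  else 0

-- ===== PRECONDITION & SPEC =====
def Spec_check_security_level (password : String) (out : Int) : Prop := out = check_security_level_alt password
instance (password : String) (out : Int) : Decidable (Spec_check_security_level password out) := by unfold Spec_check_security_level; infer_instance

-- ===== CLAIM (what is proved, stated in full; the proofs are below) =====
def Claim_equal_check_security_level : Prop := ∀ (password : String), Dom_check_security_level password → Spec_check_security_level password (check_security_level password)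

-- ===== LEMMAS AND PROOFS =====
theorem pvAltLoop_eq (cs : List Char) : ∀ a d s : Bool,
    pvAltLoop cs a d s =
      (a || cs.any (fun c => PySem.Chars.isalpha c),
       d || cs.any (fun c => PySem.Chars.isdigit c),
       s || cs.any (fun c => pvPunct.contains c)) := by
  induction cs with
  | nil => intro a d s; simp [pvAltLoop]
  | cons c cs ih =>
    intro a d s
    cases ha : PySem.Chars.isalpha c <;> cases hd : PySem.Chars.isdigit c <;>
      cases hs : pvPunct.contains c <;> cases a <;> cases d <;> cases s <;>
      (simp [pvAltLoop, ha, hd, hs, ih]; try tauto)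

-- ===== VERDICT (by name: the statement is the Claim_ definition above) =====
theorem check_security_level_spec : Claim_equal_check_security_level := by
  intro password _
  unfold Spec_check_security_level check_security_level check_security_level_alt
  simp [pvAltLoop_eq]
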